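-- pv_equiv track=rewrite | github.com/olatayo24/instagram-to-excel | price_store.py | find_price_reply
-- ===== SOURCE A (Python) =====
-- def find_price_reply(message_text: str, prices_map: dict) -> str:
--     """Very simple fuzzy contains: if any product name appears in the message, reply with its price."""
--     if not message_text:
--         return "Please tell me the product you want 😊"
--     msg = message_text.lower()
--     # Try longest product names first (more specific)
--     for product in sorted(prices_map.keys(), key=len, reverse=True):
--         if product in msg:
--             price = prices_map[product]
--             if price:
--                 return f"The price for {product.title()} is {price}."
--             else:
--                 return f"I have {product.title()} but the price is not set yet."
--     return "Please specify the exact product name (e.g., 'AirPods', 'iPhone 14', 'PS5')."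
-- ===== SOURCE B (Python) =====
-- def find_price_reply(message_text: str, prices_map: dict) -> str:
--     """Single pass over the dict keeping the longest matching product (strict > keeps the earliest on ties)."""
--     if not message_text:
--         return "Please tell me the product you want 😊"
--     msg = message_text.lower()
--     best = None
--     for product in prices_map:
--         if product in msg and (best is None or len(product) > len(best)):
--             best = product
--     if best is None:
--         return "Please specify the exact product name (e.g., 'AirPods', 'iPhone 14', 'PS5')."
--     price = prices_map[best]
--     if price:
--         return f"The price for {best.title()} is {price}."
--     return f"I have {best.title()} but the price is not set yet."
-- ===== Notes on version B (the rewrite author's own statement) =====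
-- stated objective: simpler
-- what changed: Replaces sort-the-keys-by-length-then-scan-for-the-first-match with a single unsorted pass keeping the longest matching product (strict > preserves A's stable tie-break), so no sorted key list is ever built.
import Mathlib
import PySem

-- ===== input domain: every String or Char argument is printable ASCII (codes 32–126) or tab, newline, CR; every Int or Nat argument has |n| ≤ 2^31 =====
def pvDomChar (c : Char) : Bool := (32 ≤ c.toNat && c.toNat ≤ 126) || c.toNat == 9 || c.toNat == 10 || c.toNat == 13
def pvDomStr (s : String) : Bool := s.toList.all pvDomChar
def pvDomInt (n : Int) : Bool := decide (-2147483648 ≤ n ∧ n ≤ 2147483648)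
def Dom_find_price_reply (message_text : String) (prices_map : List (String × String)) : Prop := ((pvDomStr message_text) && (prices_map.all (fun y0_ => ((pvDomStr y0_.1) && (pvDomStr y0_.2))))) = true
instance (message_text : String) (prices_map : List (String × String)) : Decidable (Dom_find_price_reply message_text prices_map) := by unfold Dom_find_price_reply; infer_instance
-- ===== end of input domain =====

-- ===== PORT A =====
-- B keeps the longest matching product in one unsorted pass instead of sorting the keys by length first (objective: simpler).
-- str.title() is not in PySem; pyTitle below is a step-for-step hand port, exact on the ASCII domain (a character is "cased" iff isalpha).
def pyTitleAux (prevCased : Bool) : List Char → List Char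
  | [] => []
  | c :: cs =>
    if PySem.Chars.isalpha c then
      (if prevCased then PySem.Chars.lowerChar c else PySem.Chars.upperChar c) :: pyTitleAux true cs
    else
      c :: pyTitleAux false cs

def pyTitle (s : String) : String := String.ofList (pyTitleAux false s.toList)

-- A's for-loop over the length-sorted keys, returning on the first product contained in msg.
-- prices_map[product] is ported as getD with "" : the loop only reaches keys of the dict, so get? is always `some`.
def findPriceLoopA (msg : String) (d : PySem.Dict String String) : List String → String
  | [] => "Please specify the exact product name (e.g., 'AirPods', 'iPhone 14', 'PS5')."
  | product :: rest =>
    if PySem.Str.isIn product msg then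
      let price := d.getD product ""
      if price ≠ "" then
        "The price for " ++ pyTitle product ++ " is " ++ price ++ "."
      else
        "I have " ++ pyTitle product ++ " but the price is not set yet."
    else
      findPriceLoopA msg d rest

def find_price_reply (message_text : String) (prices_map : List (String × String)) : String :=
  if message_text = "" then
    "Please tell me the product you want 😊"
  else
    let msg := PySem.Str.lower message_text
    let d := PySem.Dict.ofList prices_map
    findPriceLoopA msg d (PySem.List.sorted d.keys (fun s => PySem.Str.len s) true)

-- ===== PORT B =====
-- B's loop body: take the product if it is in msg and strictly longer than the current best (or best is None).
def bestStep (msg : String) (b : Option String) (product : String) : Option String :=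
  if PySem.Str.isIn product msg &&
      (match b with
       | none => true
       | some m => decide (PySem.Str.len m < PySem.Str.len product)) then
    some product
  else
    b

def find_price_reply_alt (message_text : String) (prices_map : List (String × String)) : String :=
  if message_text = "" then
    "Please tell me the product you want 😊"
  else
    let msg := PySem.Str.lower message_text
    let d := PySem.Dict.ofList prices_map
    match d.keys.foldl (bestStep msg) none with
    | none => "Please specify the exact product name (e.g., 'AirPods', 'iPhone 14', 'PS5')."
    | some best =>
      let price := d.getD best ""
      if price ≠ "" then
        "The price for " ++ pyTitle best ++ " is " ++ price ++ "."
      else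
        "I have " ++ pyTitle best ++ " but the price is not set yet."

-- ===== PRECONDITION & SPEC =====
def Spec_find_price_reply (message_text : String) (prices_map : List (String × String)) (out : String) : Prop := out = find_price_reply_alt message_text prices_map
instance (message_text : String) (prices_map : List (String × String)) (out : String) : Decidable (Spec_find_price_reply message_text prices_map out) := by unfold Spec_find_price_reply; infer_instance

-- ===== CLAIM (what is proved, stated in full; the proofs are below) =====
def Claim_equal_find_price_reply : Prop := ∀ (message_text : String) (prices_map : List (String × String)), Dom_find_price_reply message_text prices_map → Spec_find_price_reply message_text prices_map (find_price_reply message_text prices_map)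

-- ===== LEMMAS AND PROOFS =====

-- A's loop is: render the first match of the sorted list (or the fallback message).
lemma findPriceLoopA_eq_find? (msg : String) (d : PySem.Dict String String) (l : List String) :
    findPriceLoopA msg d l =
      match l.find? (fun x => PySem.Str.isIn x msg) with
      | none => "Please specify the exact product name (e.g., 'AirPods', 'iPhone 14', 'PS5')."
      | some product =>
        let price := d.getD product ""
        if price ≠ "" then
          "The price for " ++ pyTitle product ++ " is " ++ price ++ "."
        else
          "I have " ++ pyTitle product ++ " but the price is not set yet." := by
  induction l with
  | nil => simp [findPriceLoopA]
  | cons x xs ih =>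
    cases hx : PySem.Chars.isIn x.toList msg.toList with
    | true => simp [findPriceLoopA, hx]
    | false => simp [findPriceLoopA, hx, ih]

-- Inserting x into a length-descending list moves the first match exactly as one bestStep.
lemma find?_insertBy_eq_bestStep (msg : String) (x : String) (acc : List String)
    (h : acc.Pairwise (fun a b => PySem.Str.len b ≤ PySem.Str.len a)) :
    (PySem.List.insertBy
        (fun a b => decide (PySem.Str.len b < PySem.Str.len a)) x acc).find?
        (fun y => PySem.Str.isIn y msg)
      = bestStep msg (acc.find? (fun y => PySem.Str.isIn y msg)) x := by
  induction acc with
  | nil =>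
    cases hx : PySem.Chars.isIn x.toList msg.toList <;>
      simp [PySem.List.insertBy, bestStep, hx]
  | cons y ys ih =>
    rcases List.pairwise_cons.mp h with ⟨hy, hys⟩
    rw [PySem.List.insertBy]
    by_cases hlt : PySem.Str.len y < PySem.Str.len x
    · have hlt' : y.length < x.length := by simpa using hlt
      cases hx : PySem.Chars.isIn x.toList msg.toList with
      | false => simp [bestStep, hlt', hx, List.find?_cons]
      | true =>
        cases hfind : List.find? (fun z => PySem.Chars.isIn z.toList msg.toList) (y :: ys) with
        | none => simp [bestStep, hlt', hx, hfind]
        | some m =>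
          have hm : m ∈ y :: ys := List.mem_of_find?_eq_some hfind
          have hlen : PySem.Str.len m ≤ PySem.Str.len y := by
            rcases List.mem_cons.mp hm with rfl | hm'
            · exact le_refl _
            · exact hy m hm'
          have hmx : m.length < x.length := by
            have := lt_of_le_of_lt hlen hlt
            simpa using this
          simp [bestStep, hlt', hx, hfind, hmx]
    · have hlt' : ¬ y.length < x.length := by simpa using hlt
      cases hy' : PySem.Chars.isIn y.toList msg.toList with
      | true => simp [bestStep, hlt', hy']
      | false => simpa [bestStep, eq_false hlt', hy', List.find?_cons] using ih hys

-- Folding the insertion sort and folding bestStep stay in lock step.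
lemma foldl_insertBy_find?_eq_foldl_bestStep (msg : String) (l : List String) :
    ∀ pref : List String,
      ((l.foldl
          (fun acc x =>
            PySem.List.insertBy (fun a b => decide ((fun s => PySem.Str.len s) b < (fun s => PySem.Str.len s) a)) x acc)
          (PySem.List.sorted pref (fun s => PySem.Str.len s) true)).find?
          (fun y => PySem.Str.isIn y msg))
        = l.foldl (bestStep msg)
            ((PySem.List.sorted pref (fun s => PySem.Str.len s) true).find? (fun y => PySem.Str.isIn y msg)) := by
  induction l with
  | nil => intro pref; simp
  | cons x xs ih =>
    intro pref
    have hsort : PySem.List.insertBy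
        (fun a b => decide ((fun s => PySem.Str.len s) b < (fun s => PySem.Str.len s) a)) x
        (PySem.List.sorted pref (fun s => PySem.Str.len s) true)
        = PySem.List.sorted (pref ++ [x]) (fun s => PySem.Str.len s) true := by
      rw [PySem.List.sorted_rev_eq_foldl_insertBy, PySem.List.sorted_rev_eq_foldl_insertBy,
        List.foldl_append]
      simp
    have hstep := find?_insertBy_eq_bestStep msg x
      (PySem.List.sorted pref (fun s => PySem.Str.len s) true)
      (PySem.List.sorted_pairwise_rev pref (fun s => PySem.Str.len s))
    simp only [List.foldl_cons]
    rw [hsort, ih (pref ++ [x]), ← hsort, hstep]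

-- The first match of the length-sorted keys IS B's fold.
lemma find?_sorted_eq_foldl_bestStep (msg : String) (ks : List String) :
    (PySem.List.sorted ks (fun s => PySem.Str.len s) true).find? (fun y => PySem.Str.isIn y msg)
      = ks.foldl (bestStep msg) none := by
  have h := foldl_insertBy_find?_eq_foldl_bestStep msg ks []
  rw [PySem.List.sorted_rev_eq_foldl_insertBy]
  simpa using h

-- ===== VERDICT (by name: the statement is the Claim_ definition above) =====
theorem find_price_reply_spec : Claim_equal_find_price_reply := by
  intro message_text prices_map _
  unfold Spec_find_price_reply find_price_reply find_price_reply_alt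
  by_cases hempty : message_text = ""
  · simp [hempty]
  · simp only [hempty, if_false]
    rw [findPriceLoopA_eq_find?, find?_sorted_eq_foldl_bestStep]
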